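-- pv_equiv track=rewrite | github.com/wooyakob/PatientIQ | backend/seed_database.py | find_relevant_research
-- ===== SOURCE A (Python) =====
-- from typing import List, Dict, Optional
--
-- CONDITION_RESEARCH_KEYWORDS = {
--     "Breast Cancer Stage II": ["breast cancer", "cancer therapy", "oncology", "tumor"],
--     "Type 2 Diabetes": ["diabetes", "glucose", "insulin", "glycemic"],
--     "Anxiety Disorder": ["anxiety", "mental health", "psychiatric", "stress"],
--     "Hypertension": ["hypertension", "blood pressure", "cardiovascular"],
--     "Multiple Sclerosis": ["multiple sclerosis", "neurological", "autoimmune", "neurodegenerative"]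
-- }
--
-- def extract_research_summary(article_text: str, max_length: int = 500) -> str:
--     """Extract a meaningful summary from article text."""
--     # Try to find the abstract or introduction
--     if "Abstract" in article_text:
--         start = article_text.find("Abstract")
--         end = article_text.find("\n\n", start + 100)
--         if end > start:
--             summary = article_text[start:end].replace("Abstract", "").strip()
--             if len(summary) > max_length:
--                 summary = summary[:max_length] + "..."
--             return summary
--
--     # Otherwise, take first meaningful paragraph
--     paragraphs = [p.strip() for p in article_text.split("\n\n") if len(p.strip()) > 100]
--     if paragraphs:
--         summary = paragraphs[0]
--         if len(summary) > max_length: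
--             summary = summary[:max_length] + "..."
--         return summary
--
--     return "Research summary not available."
--
-- def find_relevant_research(condition: str, articles: List[Dict], num_summaries: int = 3) -> List[str]:
--     """Find relevant research articles for a condition."""
--     keywords = CONDITION_RESEARCH_KEYWORDS.get(condition, [])
--     if not keywords or not articles:
--         return [
--             f"Recent advances in {condition} treatment continue to show promise.",
--             f"Clinical trials for {condition} demonstrate improved patient outcomes.",
--             f"New therapeutic approaches for {condition} are under investigation."
--         ]
--
--     relevant_articles = []
--     for article in articles:
--         article_text = article.get("article_text", "").lower()
--         # Check if any keyword appears in the article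
--         if any(keyword.lower() in article_text for keyword in keywords):
--             relevant_articles.append(article)
--             if len(relevant_articles) >= num_summaries * 2:  # Get extra for variety
--                 break
--
--     # Extract summaries
--     summaries = []
--     for article in relevant_articles[:num_summaries]:
--         summary = extract_research_summary(article.get("article_text", ""))
--         if summary and summary not in summaries:
--             summaries.append(summary)
--
--     # Fill with generic summaries if needed
--     while len(summaries) < num_summaries:
--         summaries.append(f"Research on {condition} continues to advance with new clinical findings.")
--
--     return summaries[:num_summaries]
-- ===== SOURCE B (Python) =====
-- from typing import List, Dict
--
-- CONDITION_RESEARCH_KEYWORDS = {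
--     "Breast Cancer Stage II": ["breast cancer", "cancer therapy", "oncology", "tumor"],
--     "Type 2 Diabetes": ["diabetes", "glucose", "insulin", "glycemic"],
--     "Anxiety Disorder": ["anxiety", "mental health", "psychiatric", "stress"],
--     "Hypertension": ["hypertension", "blood pressure", "cardiovascular"],
--     "Multiple Sclerosis": ["multiple sclerosis", "neurological", "autoimmune", "neurodegenerative"]
-- }
--
-- def extract_research_summary(article_text: str, max_length: int = 500) -> str:
--     """Extract a meaningful summary from article text."""
--     if "Abstract" in article_text:
--         start = article_text.find("Abstract")
--         end = article_text.find("\n\n", start + 100)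
--         if end > start:
--             summary = article_text[start:end].replace("Abstract", "").strip()
--             if len(summary) > max_length:
--                 summary = summary[:max_length] + "..."
--             return summary
--     paragraphs = [p.strip() for p in article_text.split("\n\n") if len(p.strip()) > 100]
--     if paragraphs:
--         summary = paragraphs[0]
--         if len(summary) > max_length:
--             summary = summary[:max_length] + "..."
--         return summary
--     return "Research summary not available."
--
-- def find_relevant_research(condition: str, articles: List[Dict], num_summaries: int = 3) -> List[str]:
--     """Find relevant research articles for a condition (single fused pass)."""
--     keywords = CONDITION_RESEARCH_KEYWORDS.get(condition, [])
--     if not keywords or not articles: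
--         return [
--             f"Recent advances in {condition} treatment continue to show promise.",
--             f"Clinical trials for {condition} demonstrate improved patient outcomes.",
--             f"New therapeutic approaches for {condition} are under investigation."
--         ]
--
--     summaries = []
--     matched = 0
--     for article in articles:
--         if matched >= num_summaries:
--             break
--         text = article.get("article_text", "")
--         low = text.lower()
--         if any(keyword.lower() in low for keyword in keywords):
--             matched += 1
--             summary = extract_research_summary(text)
--             if summary and summary not in summaries:
--                 summaries.append(summary)
--
--     while len(summaries) < num_summaries:
--         summaries.append(f"Research on {condition} continues to advance with new clinical findings.")
--
--     return summaries
-- ===== Notes on version B (the rewrite author's own statement) =====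
-- stated objective: simpler
-- what changed: Replaced A's three passes (collect up to num_summaries*2 matching articles, slice to num_summaries, then a second summary/dedup loop, then a final slice) by one fused scan that stops after num_summaries matching articles and deduplicates summaries as it goes, with the same generic fill.
import Mathlib
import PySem

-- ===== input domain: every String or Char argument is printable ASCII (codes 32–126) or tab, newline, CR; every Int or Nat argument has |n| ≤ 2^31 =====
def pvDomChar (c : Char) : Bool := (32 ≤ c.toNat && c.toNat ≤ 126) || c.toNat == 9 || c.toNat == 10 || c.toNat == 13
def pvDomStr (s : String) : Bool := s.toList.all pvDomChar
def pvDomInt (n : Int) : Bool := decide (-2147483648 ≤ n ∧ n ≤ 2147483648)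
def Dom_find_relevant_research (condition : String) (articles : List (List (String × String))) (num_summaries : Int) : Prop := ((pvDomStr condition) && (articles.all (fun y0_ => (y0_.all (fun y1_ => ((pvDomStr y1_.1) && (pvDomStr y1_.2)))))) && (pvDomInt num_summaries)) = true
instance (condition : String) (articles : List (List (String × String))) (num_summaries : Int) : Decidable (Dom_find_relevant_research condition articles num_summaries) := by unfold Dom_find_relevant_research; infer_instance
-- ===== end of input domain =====

-- B fuses A's three passes (collect up to num_summaries*2 matches, slice, summary/dedup loop, final slice)
-- into one scan that stops after num_summaries matching articles; objective: simpler (same asymptotic cost).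

-- ===== PORT A =====
-- shared module constant
def CONDITION_RESEARCH_KEYWORDS : PySem.Dict String (List String) :=
  PySem.Dict.mk
    [("Breast Cancer Stage II", ["breast cancer", "cancer therapy", "oncology", "tumor"]),
     ("Type 2 Diabetes", ["diabetes", "glucose", "insulin", "glycemic"]),
     ("Anxiety Disorder", ["anxiety", "mental health", "psychiatric", "stress"]),
     ("Hypertension", ["hypertension", "blood pressure", "cardiovascular"]),
     ("Multiple Sclerosis", ["multiple sclerosis", "neurological", "autoimmune", "neurodegenerative"])]

-- shared helper, identical in both Pythons: extract_research_summary(article_text, max_length=500)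
def extract_research_summary (article_text : String) (max_length : Int) : String :=
  -- fall-through part ("first meaningful paragraph"); article_text.split("\n\n") with a nonempty literal sep, so .getD [] is exact
  let fallback :=
    let paragraphs := ((PySem.Str.split? article_text "\n\n").getD []).filterMap
      (fun p => let q := PySem.Str.strip p; if 100 < PySem.Str.len q then some q else none)
    match paragraphs with
    | [] => "Research summary not available."
    | summary :: _ =>
      if max_length < (PySem.Str.len summary : Int) then
        PySem.Str.slice summary none (some max_length) ++ "..."
      else summary
  if PySem.Str.isIn "Abstract" article_text then
    let start := PySem.Str.find article_text "Abstract"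
    let stop := PySem.Str.findFrom article_text "\n\n" (start + 100)
    if start < stop then
      let summary := PySem.Str.strip
        (PySem.Str.replace (PySem.Str.slice article_text (some start) (some stop)) "Abstract" "")
      if max_length < (PySem.Str.len summary : Int) then
        PySem.Str.slice summary none (some max_length) ++ "..."
      else summary
    else fallback
  else fallback

-- shared helper: article.get("article_text", "")
def pvText (article : List (String × String)) : String :=
  PySem.Dict.getD (PySem.Dict.mk article) "article_text" ""

-- shared expression: any(keyword.lower() in article_text for keyword in keywords)
def pvMatches (keywords : List String) (article_text : String) : Bool :=
  keywords.any (fun keyword => PySem.Str.isIn (PySem.Str.lower keyword) article_text)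

-- shared early-return list
def pvGeneric3 (condition : String) : List String :=
  ["Recent advances in " ++ condition ++ " treatment continue to show promise.",
   "Clinical trials for " ++ condition ++ " demonstrate improved patient outcomes.",
   "New therapeutic approaches for " ++ condition ++ " are under investigation."]

-- shared while-loop: while len(summaries) < num_summaries: summaries.append(generic)
def pvFillLoop (n : Int) (g : String) (summaries : List String) : List String :=
  if _h : (summaries.length : Int) < n then pvFillLoop n g (summaries ++ [g]) else summaries
termination_by (n - summaries.length).toNat
decreasing_by simp only [List.length_append, List.length_cons, List.length_nil]; omega

-- A's first loop: collect relevant articles, break once len(relevant) >= num_summaries*2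
def pvRelLoop (keywords : List String) (lim : Int) :
    List (List (String × String)) → List (List (String × String)) → List (List (String × String))
  | [], rel => rel
  | article :: rest, rel =>
    let article_text := PySem.Str.lower (pvText article)
    if pvMatches keywords article_text then
      let rel' := rel ++ [article]
      if lim ≤ (rel'.length : Int) then rel' else pvRelLoop keywords lim rest rel'
    else pvRelLoop keywords lim rest rel

-- A's second loop: extract summaries with dedup
def pvSumLoop : List (List (String × String)) → List String → List String
  | [], summaries => summaries
  | article :: rest, summaries =>
    let summary := extract_research_summary (pvText article) 500
    pvSumLoop rest
      (if summary != "" && !(summaries.contains summary) then summaries ++ [summary] else summaries)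

def find_relevant_research (condition : String) (articles : List (List (String × String))) (num_summaries : Int) : List String :=
  let keywords := PySem.Dict.getD CONDITION_RESEARCH_KEYWORDS condition []
  if keywords.isEmpty || articles.isEmpty then pvGeneric3 condition
  else
    let relevant_articles := pvRelLoop keywords (num_summaries * 2) articles []
    let summaries := pvSumLoop (PySem.List.slice relevant_articles none (some num_summaries)) []
    let summaries2 := pvFillLoop num_summaries
      ("Research on " ++ condition ++ " continues to advance with new clinical findings.") summaries
    PySem.List.slice summaries2 none (some num_summaries)

-- ===== PORT B =====
-- B's single fused loop: stop after num_summaries matching articles, summarising and deduplicating as we go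
def pvFusedLoop (keywords : List String) (n : Int) :
    List (List (String × String)) → Int → List String → List String
  | [], _, summaries => summaries
  | article :: rest, matched, summaries =>
    if matched ≥ n then summaries
    else
      let text := pvText article
      let low := PySem.Str.lower text
      if pvMatches keywords low then
        let summary := extract_research_summary text 500
        pvFusedLoop keywords n rest (matched + 1)
          (if summary != "" && !(summaries.contains summary) then summaries ++ [summary] else summaries)
      else pvFusedLoop keywords n rest matched summaries

def find_relevant_research_alt (condition : String) (articles : List (List (String × String))) (num_summaries : Int) : List String :=
  let keywords := PySem.Dict.getD CONDITION_RESEARCH_KEYWORDS condition []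
  if keywords.isEmpty || articles.isEmpty then pvGeneric3 condition
  else
    let summaries := pvFusedLoop keywords num_summaries articles 0 []
    pvFillLoop num_summaries
      ("Research on " ++ condition ++ " continues to advance with new clinical findings.") summaries

-- ===== PRECONDITION & SPEC =====
def Spec_find_relevant_research (condition : String) (articles : List (List (String × String))) (num_summaries : Int) (out : List String) : Prop := out = find_relevant_research_alt condition articles num_summaries
instance (condition : String) (articles : List (List (String × String))) (num_summaries : Int) (out : List String) : Decidable (Spec_find_relevant_research condition articles num_summaries out) := by unfold Spec_find_relevant_research; infer_instance

-- ===== CLAIM (what is proved, stated in full; the proofs are below) =====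
def Claim_equal_find_relevant_research : Prop := ∀ (condition : String) (articles : List (List (String × String))) (num_summaries : Int), Dom_find_relevant_research condition articles num_summaries → Spec_find_relevant_research condition articles num_summaries (find_relevant_research condition articles num_summaries)

-- ===== LEMMAS AND PROOFS =====

-- A's collect loop gathers the first (lim - |rel|, but at least 1) matching articles after rel
theorem pvRelLoop_eq (keywords : List String) (lim : Int) (arts : List (List (String × String))) :
    ∀ rel, pvRelLoop keywords lim arts rel =
      rel ++ (arts.filter (fun x => pvMatches keywords (PySem.Str.lower (pvText x)))).take
        (max (lim - rel.length) 1).toNat := by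
  induction arts with
  | nil => intro rel; simp [pvRelLoop]
  | cons a rest ih =>
    intro rel
    simp only [pvRelLoop]
    by_cases hp : pvMatches keywords (PySem.Str.lower (pvText a)) = true
    · have hfc : List.filter (fun x => pvMatches keywords (PySem.Str.lower (pvText x))) (a :: rest)
          = a :: List.filter (fun x => pvMatches keywords (PySem.Str.lower (pvText x))) rest := by
        simp [hp]
      rw [hfc, if_pos hp]
      by_cases hl : lim ≤ ((rel ++ [a]).length : Int)
      · rw [if_pos hl]
        have hK : (max (lim - (rel.length : Int)) 1).toNat = 1 := by
          simp only [List.length_append, List.length_cons, List.length_nil] at hl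
          push_cast at hl ⊢; omega
        rw [hK, List.take_succ_cons, List.take_zero]
      · rw [if_neg hl, ih (rel ++ [a])]
        have hK : (max (lim - (rel.length : Int)) 1).toNat
            = (max (lim - ((rel ++ [a]).length : Int)) 1).toNat + 1 := by
          simp only [List.length_append, List.length_cons, List.length_nil] at hl ⊢
          push_cast at hl ⊢; omega
        rw [hK, List.take_succ_cons]
        simp [List.append_assoc]
    · have hfc : List.filter (fun x => pvMatches keywords (PySem.Str.lower (pvText x))) (a :: rest)
          = List.filter (fun x => pvMatches keywords (PySem.Str.lower (pvText x))) rest := by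
        simp [hp]
      rw [hfc, if_neg hp, ih rel]

-- B's fused loop is A's summary loop run on the first (n - matched) matching articles
theorem pvFusedLoop_eq (keywords : List String) (n : Int) (arts : List (List (String × String))) :
    ∀ matched summaries, pvFusedLoop keywords n arts matched summaries =
      pvSumLoop ((arts.filter (fun x => pvMatches keywords (PySem.Str.lower (pvText x)))).take
        (n - matched).toNat) summaries := by
  induction arts with
  | nil => intro matched summaries; simp [pvFusedLoop, pvSumLoop]
  | cons a rest ih =>
    intro matched summaries
    simp only [pvFusedLoop]
    by_cases hm : matched ≥ n
    · have h0 : (n - matched).toNat = 0 := by omega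
      rw [if_pos hm, h0, List.take_zero]
      simp [pvSumLoop]
    · rw [if_neg hm]
      by_cases hp : pvMatches keywords (PySem.Str.lower (pvText a)) = true
      · have hfc : List.filter (fun x => pvMatches keywords (PySem.Str.lower (pvText x))) (a :: rest)
            = a :: List.filter (fun x => pvMatches keywords (PySem.Str.lower (pvText x))) rest := by
          simp [hp]
        rw [hfc]
        have hK : (n - matched).toNat = (n - (matched + 1)).toNat + 1 := by omega
        rw [hK, List.take_succ_cons, if_pos hp, ih (matched + 1)]
        simp only [pvSumLoop]
      · have hfc : List.filter (fun x => pvMatches keywords (PySem.Str.lower (pvText x))) (a :: rest)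
            = List.filter (fun x => pvMatches keywords (PySem.Str.lower (pvText x))) rest := by
          simp [hp]
        rw [hfc, if_neg hp, ih matched summaries]

-- the summary loop appends at most one summary per article
theorem pvSumLoop_len (l : List (List (String × String))) :
    ∀ summaries, (pvSumLoop l summaries).length ≤ summaries.length + l.length := by
  induction l with
  | nil => intro summaries; simp [pvSumLoop]
  | cons a rest ih =>
    intro summaries
    simp only [pvSumLoop]
    refine le_trans (ih _) ?_
    split <;> simp <;> omega

-- the fill loop pads with copies of g up to length n
theorem pvFillLoop_eq (n : Int) (g : String) :
    ∀ (k : Nat) (summaries : List String), (n - (summaries.length : Int)).toNat = k →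
      pvFillLoop n g summaries = summaries ++ List.replicate k g := by
  intro k
  induction k with
  | zero =>
    intro s hk
    rw [pvFillLoop]
    have h : ¬ ((s.length : Int) < n) := by omega
    simp [h]
  | succ k ih =>
    intro s hk
    rw [pvFillLoop]
    have h : (s.length : Int) < n := by omega
    rw [dif_pos h, ih (s ++ [g])
      (by simp only [List.length_append, List.length_cons, List.length_nil]; push_cast; omega)]
    simp [List.replicate_succ]

theorem pvFillLoop_len (n : Int) (g : String) (summaries : List String) :
    (pvFillLoop n g summaries).length = summaries.length + (n - (summaries.length : Int)).toNat := by
  rw [pvFillLoop_eq n g _ summaries rfl]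
  simp

-- slicing an empty list gives the empty list
theorem pvSlice_nil {α : Type} (a b : Option Int) : PySem.List.slice ([] : List α) a b = [] := by
  simp [PySem.List.slice]

-- xs[:n] = xs.take n.toNat for 0 ≤ n
theorem pvSlice_to_nonneg {α : Type} (xs : List α) (n : Int) (h : 0 ≤ n) :
    PySem.List.slice xs none (some n) = xs.take n.toNat := by
  have hn : n = ((n.toNat : Nat) : Int) := by omega
  rw [hn, PySem.List.slice_to_natCast, Int.toNat_natCast]

-- xs[:n] = [] for n ≤ 0 on a list of length ≤ 1
theorem pvSlice_to_nonpos {α : Type} (xs : List α) (n : Int) (hn : n ≤ 0) (hx : xs.length ≤ 1) :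
    PySem.List.slice xs none (some n) = [] := by
  rcases eq_or_lt_of_le hn with h0 | hneg
  · subst h0
    simpa using PySem.List.slice_to_natCast xs 0
  · have hk : n = -(((-n).toNat : Nat) : Int) := by omega
    rw [hk, PySem.List.slice_to_neg_natCast xs (-n).toNat (by omega)]
    have h0 : xs.length - (-n).toNat = 0 := by omega
    rw [h0, List.take_zero]

-- ===== VERDICT (by name: the statement is the Claim_ definition above) =====
theorem find_relevant_research_spec : Claim_equal_find_relevant_research := by
  intro condition articles num_summaries _
  unfold Spec_find_relevant_research
  show find_relevant_research condition articles num_summaries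
      = find_relevant_research_alt condition articles num_summaries
  unfold find_relevant_research find_relevant_research_alt
  by_cases hb : ((PySem.Dict.getD CONDITION_RESEARCH_KEYWORDS condition []).isEmpty || articles.isEmpty) = true
  · rw [if_pos hb, if_pos hb]
  · rw [if_neg hb, if_neg hb]
    set kw := PySem.Dict.getD CONDITION_RESEARCH_KEYWORDS condition [] with hkw
    set g := "Research on " ++ condition ++ " continues to advance with new clinical findings." with hg
    rw [pvRelLoop_eq kw (num_summaries * 2) articles [], pvFusedLoop_eq kw num_summaries articles 0]
    simp only [List.length_nil, Nat.cast_zero, Int.sub_zero, List.nil_append]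
    by_cases hn : 0 < num_summaries
    · -- both pre-fill summary lists are pvSumLoop ((filtered).take num_summaries.toNat) []
      have hmax : (max (num_summaries * 2) 1).toNat = 2 * num_summaries.toNat := by omega
      rw [hmax, pvSlice_to_nonneg _ num_summaries hn.le, pvSlice_to_nonneg _ num_summaries hn.le,
        List.take_take]
      have hmin : min num_summaries.toNat (2 * num_summaries.toNat) = num_summaries.toNat := by omega
      rw [hmin]
      -- A's trailing slice is the identity: the filled list has length num_summaries.toNat
      refine List.take_of_length_le ?_
      rw [pvFillLoop_len]
      have hlen0 := pvSumLoop_len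
        (List.take num_summaries.toNat
          (List.filter (fun x => pvMatches kw (PySem.Str.lower (pvText x))) articles)) []
      simp only [List.length_nil, List.length_take, Nat.zero_add] at hlen0
      omega
    · -- num_summaries ≤ 0: both sides are []
      have hmax : (max (num_summaries * 2) 1).toNat = 1 := by omega
      have ht0 : num_summaries.toNat = 0 := by omega
      rw [hmax, ht0, List.take_zero]
      rw [pvSlice_to_nonpos
        (List.take 1 (List.filter (fun x => pvMatches kw (PySem.Str.lower (pvText x))) articles))
        num_summaries (by omega) (by rw [List.length_take]; omega)]
      rw [show pvSumLoop [] [] = [] from rfl]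
      rw [pvFillLoop_eq num_summaries g 0 []
        (by simp only [List.length_nil, Nat.cast_zero]; omega)]
      simp only [List.replicate_zero, List.append_nil]
      exact pvSlice_nil _ _
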